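-- pv_equiv track=rewrite | github.com/ITE-Ensenada/objetos | algoritmo_combperm.py | permutaciones_repeticion
-- ===== SOURCE A (Python) =====
-- def permutaciones_repeticion(array, r):
--     '''
--     *Referencia*:
--
--     Formula: P(n,r = n**r)
--
--     Esta funcion se encarga de calcular todas las permutaciones posibles
--     PERMITIENDO repetir elementos
--     '''
--     def muestra_permurepeticion(array, r, temp, muestra_resultados):
--         if r == 0:
--             muestra_resultados.append(temp[:])
--             return
--
--         for elemento in array:
--             temp.append(elemento)
--             muestra_permurepeticion(array, r-1, temp, muestra_resultados)
--             temp.pop()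
--
--     muestra_resultados = []
--     muestra_permurepeticion(array, r, [], muestra_resultados)
--     return muestra_resultados
-- ===== SOURCE B (Python) =====
-- def permutaciones_repeticion(array, r):
--     results = [[]]
--     for _ in range(r):
--         results = [p + [e] for p in results for e in array]
--     return results
-- ===== Notes on version B (the rewrite author's own statement) =====
-- stated objective: simpler
-- what changed: Replaces the recursive backtracking helper (mutable temp with append/pop and an output accumulator) by an iterative breadth-wise construction: start from [[]] and r times extend every partial tuple by every element of array.
-- outside the precondition, e.g. on permutaciones_repeticion([], -1): A returns [], B returns [[]]
import Mathlib
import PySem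

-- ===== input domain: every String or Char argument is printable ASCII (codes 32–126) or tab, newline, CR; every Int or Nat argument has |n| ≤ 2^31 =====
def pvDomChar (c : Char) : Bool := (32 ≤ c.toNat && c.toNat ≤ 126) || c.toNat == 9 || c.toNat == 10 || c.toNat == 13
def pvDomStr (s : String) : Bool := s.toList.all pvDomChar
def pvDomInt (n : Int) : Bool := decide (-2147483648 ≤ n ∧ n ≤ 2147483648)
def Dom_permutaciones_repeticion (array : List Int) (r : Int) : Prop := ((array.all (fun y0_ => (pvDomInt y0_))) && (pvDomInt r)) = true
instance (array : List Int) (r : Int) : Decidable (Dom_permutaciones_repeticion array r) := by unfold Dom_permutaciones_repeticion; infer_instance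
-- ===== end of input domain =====

-- B replaces A's recursive backtracking (mutable temp + output accumulator) by an
-- iterative breadth-wise construction of the Cartesian product (objective: simpler).

-- ===== PORT A =====
-- Inner helper `muestra_permurepeticion`: recursion on r (decreasing to the `r == 0`
-- check), temp extended/popped around each recursive call, results accumulated.
-- The recursion depth is r, so for r ≥ 0 (= Pre_) we recurse on the fuel r.toNat,
-- which equals the Python recursion step for step there.
def muestraPermurepeticion (array : List Int) : Nat → List Int → List (List Int) → List (List Int)
  | 0, temp, acc => acc ++ [temp]
  | n + 1, temp, acc =>
      array.foldl (fun acc elemento => muestraPermurepeticion array n (temp ++ [elemento]) acc) acc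

def permutaciones_repeticion (array : List Int) (r : Int) : List (List Int) :=
  muestraPermurepeticion array r.toNat [] []

-- ===== PORT B =====
-- results = [[]]; for _ in range(r): results = [p + [e] for p in results for e in array]
def permutaciones_repeticion_alt (array : List Int) (r : Int) : List (List Int) :=
  (List.range r.toNat).foldl
    (fun results _ => results.flatMap (fun p => array.map (fun e => p ++ [e]))) [[]]

-- ===== PRECONDITION & SPEC =====
-- Pre_ excludes negative r: there A infinite-recurses (RecursionError) on nonempty
-- arrays, and on the empty array A's [] vs B's [[]] are both accidental corner values.
def Pre_permutaciones_repeticion (array : List Int) (r : Int) : Prop := 0 ≤ r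
instance (array : List Int) (r : Int) : Decidable (Pre_permutaciones_repeticion array r) := by
  unfold Pre_permutaciones_repeticion; infer_instance

def pvWitness_permutaciones_repeticion : List Int × Int := ([1, 2], 2)

def Spec_permutaciones_repeticion (array : List Int) (r : Int) (out : List (List Int)) : Prop :=
  out = permutaciones_repeticion_alt array r
instance (array : List Int) (r : Int) (out : List (List Int)) : Decidable (Spec_permutaciones_repeticion array r out) := by
  unfold Spec_permutaciones_repeticion; infer_instance

-- ===== CLAIM (what is proved, stated in full; the proofs are below) =====
def Claim_equal_permutaciones_repeticion : Prop := ∀ (array : List Int) (r : Int), Dom_permutaciones_repeticion array r → Pre_permutaciones_repeticion array r → Spec_permutaciones_repeticion array r (permutaciones_repeticion array r)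

-- ===== LEMMAS AND PROOFS =====

-- Head-first (A-shaped) characterisation of the n-fold product.
def prodL (array : List Int) : Nat → List (List Int)
  | 0 => [[]]
  | n + 1 => array.flatMap (fun e => (prodL array n).map (fun p => e :: p))

-- One cons at the head commutes with extending every list at the tail.
lemma cons_commute (array : List Int) (e : Int) (X : List (List Int)) :
    (X.flatMap (fun p => array.map (fun x => p ++ [x]))).map (fun p => e :: p)
      = (X.map (fun p => e :: p)).flatMap (fun p => array.map (fun x => p ++ [x])) := by
  simp [List.map_flatMap, List.flatMap_map, Function.comp_def]

-- Extending at the last position commutes with the head-first construction.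
lemma prodL_succ_last (array : List Int) (n : Nat) :
    prodL array (n + 1) = (prodL array n).flatMap (fun p => array.map (fun e => p ++ [e])) := by
  induction n with
  | zero => show array.flatMap _ = _; induction array <;> simp_all [prodL]
  | succ n ih =>
      calc array.flatMap (fun e => (prodL array (n + 1)).map (fun p => e :: p))
          = array.flatMap (fun e =>
              (((prodL array n).flatMap (fun p => array.map (fun x => p ++ [x]))).map
                (fun p => e :: p))) := by rw [ih]
        _ = array.flatMap (fun e =>
              ((prodL array n).map (fun p => e :: p)).flatMap
                (fun p => array.map (fun x => p ++ [x]))) := by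
              simp only [cons_commute]
        _ = (array.flatMap (fun e => (prodL array n).map (fun p => e :: p))).flatMap
              (fun p => array.map (fun x => p ++ [x])) := by
              rw [List.flatMap_assoc]
        _ = (prodL array (n + 1)).flatMap (fun p => array.map (fun e => p ++ [e])) := rfl

-- The foldl in A's helper, assuming the inner calls already characterised.
lemma foldl_muestra (array : List Int) (n : Nat)
    (ih : ∀ temp acc, muestraPermurepeticion array n temp acc
            = acc ++ (prodL array n).map (fun p => temp ++ p)) :
    ∀ (l : List Int) (temp : List Int) (acc : List (List Int)),
      l.foldl (fun acc e => muestraPermurepeticion array n (temp ++ [e]) acc) acc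
        = acc ++ l.flatMap (fun e => (prodL array n).map (fun p => temp ++ e :: p)) := by
  intro l
  induction l with
  | nil => simp
  | cons a as iha =>
      intro temp acc
      simp only [List.foldl_cons, List.flatMap_cons]
      rw [iha, ih]
      simp [List.append_assoc]

-- A's recursive helper computes acc ++ (prodL n) prefixed with temp.
lemma muestra_eq (array : List Int) (n : Nat) :
    ∀ (temp : List Int) (acc : List (List Int)),
      muestraPermurepeticion array n temp acc = acc ++ (prodL array n).map (fun p => temp ++ p) := by
  induction n with
  | zero => intro temp acc; simp [muestraPermurepeticion, prodL]
  | succ n ih =>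
      intro temp acc
      show List.foldl _ _ _ = _
      rw [foldl_muestra array n ih]
      simp [prodL, List.map_flatMap, Function.comp_def]

-- B's fold computes prodL as well.
lemma alt_eq_prodL (array : List Int) (n : Nat) :
    (List.range n).foldl
      (fun results _ => results.flatMap (fun p => array.map (fun e => p ++ [e]))) [[]]
      = prodL array n := by
  induction n with
  | zero => simp [prodL]
  | succ n ih => rw [List.range_succ, List.foldl_append, ih, List.foldl_cons, List.foldl_nil,
      ← prodL_succ_last]

-- ===== VERDICT (by name: the statement is the Claim_ definition above) =====
theorem permutaciones_repeticion_spec : Claim_equal_permutaciones_repeticion := by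
  intro array r _ _
  unfold Spec_permutaciones_repeticion permutaciones_repeticion permutaciones_repeticion_alt
  rw [alt_eq_prodL, muestra_eq]
  simp
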